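-- pv_equiv track=rewrite | github.com/leideng/CANN-8.1.RC1 | Ascend/ascend-toolkit/8.1.RC1/opp/built-in/op_impl/ai_core/tbe/impl/strided_slice_d.py | _get_last_not_one
-- ===== SOURCE A (Python) =====
-- def _get_last_not_one(shape):
--     """
--     get the first axis which is not one from the back
--
--     """
--     flag = -1
--     axis = 0
--     for i, item in enumerate(reversed(shape)):
--         if item > 1:
--             flag = i
--             break
--     if flag != -1:
--         axis = len(shape) - flag - 1
--
--     return axis
-- ===== SOURCE B (Python) =====
-- def _get_last_not_one(shape):
--     axis = 0
--     for i, item in enumerate(shape):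
--         if item > 1:
--             axis = i
--     return axis
-- ===== Notes on version B (the rewrite author's own statement) =====
-- stated objective: simpler
-- what changed: Single forward pass keeping the last index whose dimension exceeds 1, replacing A's reversed scan with early break, sentinel flag and len-flag-1 index arithmetic.
import Mathlib
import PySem

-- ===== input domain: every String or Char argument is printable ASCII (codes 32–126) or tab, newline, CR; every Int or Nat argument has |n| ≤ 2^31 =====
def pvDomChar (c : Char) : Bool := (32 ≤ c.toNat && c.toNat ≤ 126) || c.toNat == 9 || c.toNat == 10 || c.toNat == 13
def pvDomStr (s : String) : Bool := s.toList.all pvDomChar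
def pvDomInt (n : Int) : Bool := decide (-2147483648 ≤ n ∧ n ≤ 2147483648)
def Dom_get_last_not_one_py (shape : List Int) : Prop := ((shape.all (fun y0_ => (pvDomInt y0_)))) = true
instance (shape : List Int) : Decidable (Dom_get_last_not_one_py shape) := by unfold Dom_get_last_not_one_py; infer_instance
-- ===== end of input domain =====

-- ===== PORT A =====
-- B replaces A's reversed scan / break / index arithmetic by a forward pass keeping the last index > 1 (simpler).
-- helper: the 'for i, item in enumerate(reversed(shape)) ... break' loop computing flag (-1 if no item > 1)
def pvALoop (i : Int) : List Int → Int
  | [] => -1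
  | item :: rest => if item > 1 then i else pvALoop (i + 1) rest

def get_last_not_one_py (shape : List Int) : Int :=
  let flag := pvALoop 0 shape.reverse
  if flag ≠ -1 then (shape.length : Int) - flag - 1 else 0

-- ===== PORT B =====
-- helper: 'for i, item in enumerate(shape): if item > 1: axis = i'
def pvBLoop (i axis : Int) : List Int → Int
  | [] => axis
  | item :: rest => pvBLoop (i + 1) (if item > 1 then i else axis) rest

def get_last_not_one_py_alt (shape : List Int) : Int :=
  pvBLoop 0 0 shape

-- ===== PRECONDITION & SPEC =====
def Spec_get_last_not_one_py (shape : List Int) (out : Int) : Prop := out = get_last_not_one_py_alt shape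
instance (shape : List Int) (out : Int) : Decidable (Spec_get_last_not_one_py shape out) := by unfold Spec_get_last_not_one_py; infer_instance

-- ===== CLAIM (what is proved, stated in full; the proofs are below) =====
def Claim_equal_get_last_not_one_py : Prop := ∀ (shape : List Int), Dom_get_last_not_one_py shape → Spec_get_last_not_one_py shape (get_last_not_one_py shape)

-- ===== LEMMAS AND PROOFS =====

theorem pvALoop_ge (l : List Int) (i : Int) :
    pvALoop i l = -1 ∨ i ≤ pvALoop i l := by
  induction l generalizing i with
  | nil => simp [pvALoop]
  | cons x r ih =>
    simp only [pvALoop]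
    by_cases hx : x > 1
    · simp [hx]
    · simp only [hx, if_false]
      rcases ih (i + 1) with h | h
      · exact Or.inl h
      · exact Or.inr (by omega)

theorem pvALoop_shift (l : List Int) (i : Int) :
    pvALoop i l = if pvALoop 0 l = -1 then -1 else pvALoop 0 l + i := by
  induction l generalizing i with
  | nil => simp [pvALoop]
  | cons x r ih =>
    simp only [pvALoop]
    by_cases hx : x > 1
    · simp [hx]
    · simp only [hx, if_neg, if_false]
      rw [ih (i + 1), ih (0 + 1)]
      have hg := pvALoop_ge r 0
      split_ifs with h1 h2 h2 <;> omega

theorem pvALoop_nonneg (l : List Int) : 0 ≤ pvALoop 0 l ∨ pvALoop 0 l = -1 := by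
  rcases pvALoop_ge l 0 with h | h
  · exact Or.inr h
  · exact Or.inl h

theorem pvBLoop_append (l : List Int) (x : Int) (i axis : Int) :
    pvBLoop i axis (l ++ [x]) =
      if x > 1 then i + (l.length : Int) else pvBLoop i axis l := by
  induction l generalizing i axis with
  | nil => simp [pvBLoop]
  | cons y r ih =>
    simp only [List.cons_append, pvBLoop, ih]
    split_ifs <;> simp [List.length_cons] <;> ring

theorem main_eq (shape : List Int) :
    get_last_not_one_py shape = get_last_not_one_py_alt shape := by
  induction shape using List.reverseRecOn with
  | nil => decide
  | append_singleton l x ih =>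
    simp only [get_last_not_one_py, get_last_not_one_py_alt] at *
    rw [pvBLoop_append]
    simp only [List.reverse_append, List.reverse_singleton, List.singleton_append,
      List.length_append, List.length_singleton, pvALoop]
    by_cases hx : x > 1
    · simp only [hx, if_pos]
      push_cast
      omega
    · simp only [hx, if_false]
      rw [pvALoop_shift l.reverse (0 + 1)]
      rcases pvALoop_nonneg l.reverse with h | h
      · rw [← ih]
        split_ifs <;> push_cast <;> omega
      · rw [← ih]
        simp [h]

-- ===== VERDICT (by name: the statement is the Claim_ definition above) =====
theorem get_last_not_one_py_spec : Claim_equal_get_last_not_one_py := by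
  intro shape _
  unfold Spec_get_last_not_one_py
  exact main_eq shape
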